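-- pv_equiv track=rewrite | github.com/LeviAlex-uu/Master-thesis-Levi | Models/Analysis.py | relativeComplements
-- ===== SOURCE A (Python) =====
-- def intersection(list1, list2):
--     """
--     Returns the intersection of the 2 lists
--     """
--     return [x for x in list1 if x in list2]
--
-- def removeList(list1, list2):
--     """
--     Removes all elements from list1 that also occur in list2
--     """
--     for x in list2:
--         try:
--             list1.remove(x)
--         except ValueError:
--             pass
--     return list1
--
-- def relativeComplements(lists):
--     """
--     Find relative complement for each model
--     """
--
--     result = []
--
--     for list in lists:
--         Ns = [intersection(list,x) for x in lists if x != list]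
--
--         relative_complement = list.copy()
--
--         for N in Ns:
--             relative_complement = removeList(relative_complement,N)
--         result.append(relative_complement)
--
--     return result
-- ===== SOURCE B (Python) =====
-- def relativeComplements(lists):
--     """
--     Find relative complement for each model
--     """
--     owners = {}
--     for lst in lists:
--         t = tuple(lst)
--         for e in lst:
--             owners.setdefault(e, set()).add(t)
--     result = []
--     for lst in lists:
--         t = tuple(lst)
--         result.append([e for e in lst if all(m == t for m in owners.get(e, ()))])
--     return result
-- ===== Notes on version B (the rewrite author's own statement) =====
-- stated objective: faster
-- what changed: Replaces the per-list quadratic scan over all other lists with repeated intersection/remove passes by a single precomputed value->set-of-owning-lists dictionary, then one filter pass per list.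
import Mathlib
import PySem

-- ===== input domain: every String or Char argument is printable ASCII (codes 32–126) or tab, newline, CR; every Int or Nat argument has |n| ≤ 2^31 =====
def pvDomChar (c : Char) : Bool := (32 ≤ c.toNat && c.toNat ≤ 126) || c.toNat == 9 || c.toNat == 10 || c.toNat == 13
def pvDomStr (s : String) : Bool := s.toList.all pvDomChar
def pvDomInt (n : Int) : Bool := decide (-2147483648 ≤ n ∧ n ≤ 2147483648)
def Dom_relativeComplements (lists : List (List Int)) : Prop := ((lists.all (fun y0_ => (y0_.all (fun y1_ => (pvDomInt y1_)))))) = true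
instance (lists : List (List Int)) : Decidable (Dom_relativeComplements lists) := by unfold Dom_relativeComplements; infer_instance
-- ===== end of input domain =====

-- B replaces A's per-list intersection/remove passes over all other lists with one precomputed
-- value -> set-of-owning-lists dictionary and a single filter pass per list (faster; return value only — neither version mutates the input).

-- ===== PORT A =====
-- [x for x in list1 if x in list2]
def intersection (list1 list2 : List Int) : List Int :=
  list1.filter (fun x => list2.contains x)

-- for x in list2: try: list1.remove(x) except ValueError: pass
def removeList (list1 list2 : List Int) : List Int :=
  list2.foldl (fun l1 x =>
    match PySem.List.remove? l1 x with
    | some l1' => l1'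
    | none => l1) list1

def relativeComplements (lists : List (List Int)) : List (List Int) :=
  lists.foldl (fun result l =>
    let Ns := (lists.filter (fun x => decide (x ≠ l))).map (fun x => intersection l x)
    let rc := Ns.foldl (fun rc N => removeList rc N) l
    result ++ [rc]) []

-- ===== PORT B =====
-- owners: value -> set of the (value-distinct) input lists containing it
def rcOwners (lists : List (List Int)) : PySem.Dict Int (PySem.Set (List Int)) :=
  lists.foldl (fun d lst =>
    lst.foldl (fun d e => d.modify e PySem.Set.empty (fun s => PySem.Set.add s lst)) d)
    PySem.Dict.empty

def relativeComplements_alt (lists : List (List Int)) : List (List Int) :=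
  let owners := rcOwners lists
  lists.foldl (fun result lst =>
    result ++ [lst.filter (fun e =>
      (owners.getD e PySem.Set.empty).all (fun m => m == lst))]) []

-- ===== PRECONDITION & SPEC =====
def Spec_relativeComplements (lists : List (List Int)) (out : List (List Int)) : Prop := out = relativeComplements_alt lists
instance (lists : List (List Int)) (out : List (List Int)) : Decidable (Spec_relativeComplements lists out) := by unfold Spec_relativeComplements; infer_instance

-- ===== CLAIM (what is proved, stated in full; the proofs are below) =====
def Claim_equal_relativeComplements : Prop := ∀ (lists : List (List Int)), Dom_relativeComplements lists → Spec_relativeComplements lists (relativeComplements lists)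

-- ===== LEMMAS AND PROOFS =====

-- A's removeList is iterated List.erase (the caught ValueError = erase of an absent element is a no-op)
theorem removeList_eq_foldl_erase (l1 l2 : List Int) :
    removeList l1 l2 = l2.foldl (fun a x => a.erase x) l1 := by
  unfold removeList
  apply PySem.List.foldl_congr_mem
  intro a x _
  by_cases h : x ∈ a
  · rw [PySem.List.remove?_eq_some_erase a x h]
  · rw [(PySem.List.remove?_eq_none_iff a x).2 h, List.erase_of_not_mem h]

-- erasing one copy of a then filtering equals filtering with the extra conjunct v ≠ a,
-- provided any further copies of a are filtered out anyway
theorem erase_filter_aux (rc : List Int) (a : Int) (q : Int → Bool)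
    (h : rc.count a ≤ 1 ∨ q a = false) :
    (rc.erase a).filter q = rc.filter (fun v => q v && !(v == a)) := by
  induction rc with
  | nil => simp
  | cons x rc ih =>
    by_cases hx : x = a
    · subst hx
      rw [List.erase_cons_head, List.filter_cons]
      have hpx : (q x && !(x == x)) = false := by simp
      rw [hpx]
      simp only [Bool.false_eq_true, if_false]
      apply List.filter_congr
      intro v hv
      rcases h with h | h
      · have hc : rc.count x = 0 := by simp at h; omega
        have hne : v ≠ x := by
          intro e; subst e
          exact (List.count_eq_zero.mp hc) hv
        simp [hne]
      · by_cases hq : q v = true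
        · have : v ≠ x := by intro e; subst e; rw [hq] at h; cases h
          simp [hq, this]
        · simp [Bool.eq_false_iff.mpr hq]
    · rw [List.erase_cons_tail (by simpa using hx)]
      simp only [List.filter_cons]
      have hr : rc.count a ≤ 1 ∨ q a = false := by
        rcases h with h | h
        · left; simp [hx] at h ⊢; omega
        · right; exact h
      rw [ih hr]
      have hxa : (x == a) = false := by simp [hx]
      simp [hxa]

-- iterated erase removes every occurrence when N carries at least as many copies as rc
theorem foldl_erase_eq_filter (N : List Int) : ∀ (rc : List Int),
    (∀ v ∈ N, rc.count v ≤ N.count v) →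
    N.foldl (fun a x => a.erase x) rc = rc.filter (fun v => !N.contains v) := by
  induction N with
  | nil => intro rc _; simp
  | cons a N' ih =>
    intro rc h
    have step : (rc.erase a).filter (fun v => !N'.contains v)
        = rc.filter (fun v => !( (a :: N').contains v)) := by
      rw [erase_filter_aux]
      · apply List.filter_congr
        intro v hv
        by_cases hva : v = a <;> simp [hva]
      · by_cases haN : a ∈ N'
        · right; simp [haN]
        · left
          have := h a (by simp)
          simp [List.count_eq_zero.mpr haN] at this
          omega
    rw [List.foldl_cons, ih (rc.erase a) ?_, step]
    intro v hv
    by_cases hva : v = a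
    · subst hva
      have := h v (by simp)
      simp at this
      rw [List.count_erase_self]
      omega
    · rw [List.count_erase_of_ne hva]
      have hav : ¬ a = v := fun e => hva e.symm
      have := h v (by simp [hv])
      simp [hav] at this ⊢
      omega

-- A's inner loop over the intersections, characterised as one filter over l
theorem perA_filter (l : List Int) (os : List (List Int)) : ∀ (p : Int → Bool),
    (os.map (fun x => intersection l x)).foldl (fun rc N => removeList rc N) (l.filter p)
      = l.filter (fun e => p e && os.all (fun x => !x.contains e)) := by
  induction os with
  | nil => intro p; simp
  | cons x os' ih =>
    intro p
    rw [List.map_cons, List.foldl_cons]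
    have h1 : removeList (l.filter p) (intersection l x)
        = l.filter (fun e => p e && !x.contains e) := by
      rw [removeList_eq_foldl_erase, foldl_erase_eq_filter]
      · rw [List.filter_filter]
        apply List.filter_congr
        intro v hv
        have hmem : ((intersection l x).contains v) = (x.contains v) := by
          by_cases hx : v ∈ x <;> simp [intersection, hv, hx]
        rw [hmem, Bool.and_comm]
      · intro v hv
        simp only [intersection] at hv ⊢
        have hvx : x.contains v = true := by
          have := (List.mem_filter.mp hv).2
          simpa using this
        calc (l.filter p).count v ≤ l.count v := List.Sublist.count_le v List.filter_sublist
          _ = (l.filter (fun y => x.contains y)).count v := (List.count_filter hvx).symm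
    rw [h1, ih]
    apply List.filter_congr
    intro e he
    simp only [List.all_cons]
    rw [Bool.and_assoc]

-- building the owners dict over one list: each of its elements gains that list
theorem rcOwners_inner (lst : List Int) (es : List Int) :
    ∀ (d : PySem.Dict Int (PySem.Set (List Int))) (e : Int),
    ((es.foldl (fun d e => d.modify e PySem.Set.empty (fun s => PySem.Set.add s lst)) d).getD e PySem.Set.empty)
      = if e ∈ es then PySem.Set.add (d.getD e PySem.Set.empty) lst else d.getD e PySem.Set.empty := by
  induction es with
  | nil => intro d e; simp
  | cons x es' ih =>
    intro x_1 e
    rw [List.foldl_cons, ih]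
    by_cases hex : e = x
    · subst hex
      rw [PySem.Dict.getD_modify]
      by_cases he' : e ∈ es'
      · simp [he']
      · simp [he']
    · rw [PySem.Dict.getD_modify]
      simp [hex]

theorem rcOwners_mem_aux (ls : List (List Int)) : ∀ (d : PySem.Dict Int (PySem.Set (List Int)))
    (m : List Int) (e : Int),
    m ∈ (ls.foldl (fun d lst =>
      lst.foldl (fun d e => d.modify e PySem.Set.empty (fun s => PySem.Set.add s lst)) d) d).getD e PySem.Set.empty
    ↔ m ∈ d.getD e PySem.Set.empty ∨ (m ∈ ls ∧ e ∈ m) := by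
  induction ls with
  | nil => intro d m e; simp
  | cons lst ls' ih =>
    intro d m e
    rw [List.foldl_cons, ih, rcOwners_inner]
    by_cases he : e ∈ lst
    · simp only [he, if_true, PySem.Set.mem_add]
      constructor
      · rintro ((h | h) | h)
        · exact Or.inl h
        · subst h; exact Or.inr ⟨List.mem_cons_self, he⟩
        · exact Or.inr ⟨List.mem_cons_of_mem _ h.1, h.2⟩
      · rintro (h | ⟨hm, hem⟩)
        · exact Or.inl (Or.inl h)
        · rcases List.mem_cons.mp hm with h | h
          · exact Or.inl (Or.inr h)
          · exact Or.inr ⟨h, hem⟩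
    · simp only [he, if_false]
      constructor
      · rintro (h | h)
        · exact Or.inl h
        · exact Or.inr ⟨List.mem_cons_of_mem _ h.1, h.2⟩
      · rintro (h | ⟨hm, hem⟩)
        · exact Or.inl h
        · rcases List.mem_cons.mp hm with h | h
          · subst h; exact absurd hem he
          · exact Or.inr ⟨h, hem⟩

-- the owners dict holds exactly the input lists containing a value
theorem rcOwners_mem (lists : List (List Int)) (m : List Int) (e : Int) :
    m ∈ (rcOwners lists).getD e PySem.Set.empty ↔ m ∈ lists ∧ e ∈ m := by
  rw [rcOwners, rcOwners_mem_aux]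
  simp [PySem.Dict.getD_empty, PySem.Set.empty]

-- the per-list results of the two programs coincide
theorem perElem_eq (lists : List (List Int)) (l : List Int) :
    ((lists.filter (fun x => decide (x ≠ l))).map (fun x => intersection l x)).foldl
        (fun rc N => removeList rc N) l
    = l.filter (fun e => ((rcOwners lists).getD e PySem.Set.empty).all (fun m => m == l)) := by
  have h0 := perA_filter l (lists.filter (fun x => decide (x ≠ l))) (fun _ => true)
  rw [List.filter_true] at h0
  rw [h0]
  apply List.filter_congr
  intro e he
  rw [Bool.true_and, Bool.eq_iff_iff]
  simp only [List.all_eq_true, List.mem_filter, decide_eq_true_eq, Bool.not_eq_eq_eq_not,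
    Bool.not_true, List.contains_eq_mem, decide_eq_false_iff_not, beq_iff_eq]
  constructor
  · intro h m hm
    have hme := (rcOwners_mem lists m e).mp hm
    by_contra hne
    exact h m ⟨hme.1, hne⟩ hme.2
  · intro h x hx hex
    exact hx.2 (h x ((rcOwners_mem lists x e).mpr ⟨hx.1, hex⟩))

-- ===== VERDICT (by name: the statement is the Claim_ definition above) =====
theorem relativeComplements_spec : Claim_equal_relativeComplements := by
  intro lists _
  unfold Spec_relativeComplements relativeComplements relativeComplements_alt
  rw [PySem.List.foldl_append_eq_flatMap, PySem.List.foldl_append_eq_flatMap]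
  simp only [List.nil_append]
  apply List.flatMap_congr
  intro l _
  exact congrArg (fun z => [z]) (perElem_eq lists l)
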